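-- pv_equiv track=rewrite | github.com/pda-sedano/Provinator | alter_provinces.py | append_to_block_with_keyword
-- ===== SOURCE A (Python) =====
-- def append_to_block_with_keyword(content, keyword, line_to_append):
--     lines = content.splitlines(keepends=True)
--
--     blocks = []
--     current_block = []
--     block_start_idx = None
--
--     # Step 1: Split into blocks with their starting line numbers
--     for idx, line in enumerate(lines):
--         if line.strip():  # Non-blank
--             if current_block == []:
--                 block_start_idx = idx
--             current_block.append(line)
--         else:  # Blank line
--             if current_block:
--                 blocks.append((block_start_idx, current_block))
--                 current_block = []
--                 block_start_idx = None
--     if current_block:  # EOF-end block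
--         blocks.append((block_start_idx, current_block))
--
--     # Step 2: Find the first block with the keyword
--     for start_idx, block in blocks:
--         if any(keyword in line for line in block):
--             insert_idx = start_idx + len(block)
--             lines.insert(insert_idx, line_to_append.rstrip() + "\n")
--             break  # Only first match
--
--     return ''.join(lines)
-- ===== SOURCE B (Python) =====
-- def append_to_block_with_keyword(content, keyword, line_to_append):
--     out = []
--     in_block = False
--     has_kw = False
--     inserted = False
--     for line in content.splitlines(keepends=True):
--         if line.strip():
--             in_block = True
--             if keyword in line:
--                 has_kw = True
--             out.append(line)
--         else:
--             if in_block and has_kw and not inserted: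
--                 out.append(line_to_append.rstrip() + "\n")
--                 inserted = True
--             in_block = False
--             has_kw = False
--             out.append(line)
--     if in_block and has_kw and not inserted:
--         out.append(line_to_append.rstrip() + "\n")
--     return ''.join(out)
-- ===== Notes on version B (the rewrite author's own statement) =====
-- stated objective: simpler
-- what changed: Replaces A's two-phase algorithm (build a list of (start_index, block) pairs, then rescan it and lines.insert by index) with a single streaming pass over the keepends-split lines that carries three flags (in_block, has_kw, inserted) and emits the appended line in place, so the blocks list and index arithmetic disappear.
import Mathlib
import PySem

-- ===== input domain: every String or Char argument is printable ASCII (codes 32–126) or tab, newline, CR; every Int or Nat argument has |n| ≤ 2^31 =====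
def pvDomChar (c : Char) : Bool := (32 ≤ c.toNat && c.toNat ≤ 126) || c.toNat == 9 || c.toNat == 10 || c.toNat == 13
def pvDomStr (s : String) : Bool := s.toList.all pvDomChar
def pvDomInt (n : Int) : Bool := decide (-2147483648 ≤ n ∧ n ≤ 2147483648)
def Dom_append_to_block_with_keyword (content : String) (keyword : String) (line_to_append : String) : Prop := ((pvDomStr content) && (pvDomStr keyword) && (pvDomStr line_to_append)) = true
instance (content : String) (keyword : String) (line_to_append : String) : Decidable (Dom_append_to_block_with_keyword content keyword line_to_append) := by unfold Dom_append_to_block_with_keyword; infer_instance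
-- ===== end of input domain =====

-- B replaces A's two-phase blocks/index machinery by one streaming pass with three flags (simpler);
-- same return value, no side effects to match.

-- Shared helper: content.splitlines(keepends=True), hand-ported (no PySem keepends form).
-- Exact for the line breaks '\n', '\r', '\r\n' — the only line-break characters in the ASCII Dom_
-- (Python additionally splits on \x0b \x0c \x1c-\x1e \x85 \u2028 \u2029, which Dom_ excludes).
def splitKeep (cur : List Char) : List Char → List (List Char)
  | [] => if cur = [] then [] else [cur.reverse]
  | '\r' :: '\n' :: rest => (cur.reverse ++ ['\r', '\n']) :: splitKeep [] rest
  | c :: rest =>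
    if c = '\n' then (cur.reverse ++ ['\n']) :: splitKeep [] rest
    else if c = '\r' then (cur.reverse ++ ['\r']) :: splitKeep [] rest
    else splitKeep (c :: cur) rest

-- Shared helper: Python's 'if line.strip():' truthiness test (both A and B perform it).
def nonblankLn (l : List Char) : Bool := !(PySem.Chars.strip l == [])

-- ===== PORT A =====
-- step 2's 'for … break' loop: first block containing the keyword triggers lines.insert
def findInsert (kw nl : List Char) (lines : List (List Char)) :
    List (Int × List (List Char)) → List (List Char)
  | [] => lines
  | (si, block) :: rest =>
    if block.any (fun l => PySem.Chars.isIn kw l) then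
      PySem.List.insert lines (si + (block.length : Int)) nl
    else findInsert kw nl lines rest

-- step 1's loop body: state = (blocks, current_block, block_start_idx)
def stepA (st : List (Int × List (List Char)) × List (List Char) × Option Int)
    (p : Int × List Char) : List (Int × List (List Char)) × List (List Char) × Option Int :=
  if nonblankLn p.2 then
    (st.1, st.2.1 ++ [p.2], if st.2.1 = [] then some p.1 else st.2.2)
  else
    if st.2.1 ≠ [] then (st.1 ++ [(st.2.2.getD 0, st.2.1)], [], none) else st

def append_to_block_with_keyword (content : String) (keyword : String) (line_to_append : String) : String :=
  let lines := splitKeep [] content.toList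
  let st := (PySem.List.enumerate lines 0).foldl stepA ([], [], none)
  let blocks := if st.2.1 ≠ [] then st.1 ++ [(st.2.2.getD 0, st.2.1)] else st.1
  let nl := PySem.Chars.rstrip line_to_append.toList ++ ['\n']
  String.mk (PySem.Chars.join [] (findInsert keyword.toList nl lines blocks))

-- ===== PORT B =====
-- streaming loop body: state = (out, in_block, has_kw, inserted)
def stepB (kw nl : List Char) (st : List (List Char) × Bool × Bool × Bool)
    (line : List Char) : List (List Char) × Bool × Bool × Bool :=
  if nonblankLn line then
    (st.1 ++ [line], true, st.2.2.1 || PySem.Chars.isIn kw line, st.2.2.2)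
  else
    if st.2.1 && st.2.2.1 && !st.2.2.2 then (st.1 ++ [nl, line], false, false, true)
    else (st.1 ++ [line], false, false, st.2.2.2)

def append_to_block_with_keyword_alt (content : String) (keyword : String) (line_to_append : String) : String :=
  let nl := PySem.Chars.rstrip line_to_append.toList ++ ['\n']
  let st := (splitKeep [] content.toList).foldl (stepB keyword.toList nl) ([], false, false, false)
  let out := if st.2.1 && st.2.2.1 && !st.2.2.2 then st.1 ++ [nl] else st.1
  String.mk (PySem.Chars.join [] out)

-- ===== PRECONDITION & SPEC =====
def Spec_append_to_block_with_keyword (content : String) (keyword : String) (line_to_append : String) (out : String) : Prop := out = append_to_block_with_keyword_alt content keyword line_to_append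
instance (content : String) (keyword : String) (line_to_append : String) (out : String) : Decidable (Spec_append_to_block_with_keyword content keyword line_to_append out) := by unfold Spec_append_to_block_with_keyword; infer_instance

-- ===== CLAIM (what is proved, stated in full; the proofs are below) =====
def Claim_equal_append_to_block_with_keyword : Prop := ∀ (content : String) (keyword : String) (line_to_append : String), Dom_append_to_block_with_keyword content keyword line_to_append → Spec_append_to_block_with_keyword content keyword line_to_append (append_to_block_with_keyword content keyword line_to_append)

-- ===== LEMMAS AND PROOFS =====

-- Common specification: process the remaining lines with 'current block has the keyword' flag hkw.
def specGo (kw nl : List Char) (hkw : Bool) : List (List Char) → List (List Char)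
  | [] => if hkw then [nl] else []
  | l :: rest =>
    if nonblankLn l then l :: specGo kw nl (hkw || PySem.Chars.isIn kw l) rest
    else if hkw then nl :: l :: rest else l :: specGo kw nl false rest

-- ---- B side ----

theorem stepB_inserted (kw nl : List Char) (ll : List (List Char)) :
    ∀ (out : List (List Char)) (inb hkw : Bool),
    (ll.foldl (stepB kw nl) (out, inb, hkw, true)).1 = out ++ ll ∧
    (ll.foldl (stepB kw nl) (out, inb, hkw, true)).2.2.2 = true := by
  induction ll with
  | nil => intro out inb hkw; simp
  | cons l rest ih =>
    intro out inb hkw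
    simp only [List.foldl_cons, stepB]
    by_cases h : nonblankLn l = true <;> simp [h, ih]

theorem stepB_run (kw nl : List Char) (ll : List (List Char)) :
    ∀ (out : List (List Char)) (inb hkw : Bool), (hkw = true → inb = true) →
    (let st := ll.foldl (stepB kw nl) (out, inb, hkw, false)
     if st.2.1 && st.2.2.1 && !st.2.2.2 then st.1 ++ [nl] else st.1)
      = out ++ specGo kw nl hkw ll := by
  induction ll with
  | nil =>
    intro out inb hkw himp
    cases hkw with
    | true => simp [specGo, himp rfl]
    | false => simp [specGo]
  | cons l rest ih =>
    intro out inb hkw himp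
    simp only [List.foldl_cons, stepB, specGo]
    by_cases h : nonblankLn l = true
    · simpa [h, List.append_assoc] using
        ih (out ++ [l]) true (hkw || PySem.Chars.isIn kw l) (fun _ => rfl)
    · cases hkw with
      | true =>
        have h2 := stepB_inserted kw nl rest (out ++ [nl, l]) false false
        simp [h, himp rfl, h2.1, h2.2]
      | false =>
        have := ih (out ++ [l]) false false (by simp)
        cases inb <;> simpa [h, List.append_assoc] using this

-- ---- A side ----

theorem findInsert_skip (kw nl : List Char) (lines : List (List Char))
    (bs : List (Int × List (List Char)))
    (hbs : ∀ b ∈ bs, b.2.any (fun l => PySem.Chars.isIn kw l) = false)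
    (rest : List (Int × List (List Char))) :
    findInsert kw nl lines (bs ++ rest) = findInsert kw nl lines rest := by
  induction bs with
  | nil => rfl
  | cons b t ih =>
    simp only [List.cons_append, findInsert, hbs b (by simp)]
    exact ih (fun x hx => hbs x (by simp [hx]))

-- one stepA step only appends to the blocks accumulator
theorem stepA_shift (bs : List (Int × List (List Char))) (cur : List (List Char))
    (si : Option Int) (p : Int × List Char) :
    stepA (bs, cur, si) p
      = (bs ++ (stepA ([], cur, si) p).1, (stepA ([], cur, si) p).2) := by
  unfold stepA; split_ifs <;> simp

-- the blocks accumulator is write-once: prefix bs passes through the fold untouched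
theorem stepA_blocks_mono (e : List (Int × List Char)) :
    ∀ (bs : List (Int × List (List Char))) (cur : List (List Char)) (si : Option Int),
    e.foldl stepA (bs, cur, si)
      = ((bs ++ (e.foldl stepA ([], cur, si)).1, (e.foldl stepA ([], cur, si)).2)) := by
  induction e with
  | nil => intro bs cur si; simp
  | cons p t ih =>
    intro bs cur si
    simp only [List.foldl_cons]
    rw [stepA_shift bs cur si p]
    rw [ih (bs ++ (stepA ([], cur, si) p).1) (stepA ([], cur, si) p).2.1
          (stepA ([], cur, si) p).2.2,
        ih (stepA ([], cur, si) p).1 (stepA ([], cur, si) p).2.1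
          (stepA ([], cur, si) p).2.2]
    simp

theorem stepA_run (kw nl : List Char) (ll : List (List Char)) :
    ∀ (pre cur : List (List Char)) (bs : List (Int × List (List Char))) (si : Option Int),
    (cur ≠ [] → si = some (pre.length : Int)) →
    (∀ b ∈ bs, b.2.any (fun l => PySem.Chars.isIn kw l) = false) →
    (let st := (PySem.List.enumerate ll ((pre.length : Int) + (cur.length : Int))).foldl stepA (bs, cur, si)
     let blocks := if st.2.1 ≠ [] then st.1 ++ [(st.2.2.getD 0, st.2.1)] else st.1
     findInsert kw nl (pre ++ cur ++ ll) blocks)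
      = pre ++ cur ++ specGo kw nl (cur.any (fun l => PySem.Chars.isIn kw l)) ll := by
  induction ll with
  | nil =>
    intro pre cur bs si hsi hbs
    simp only [PySem.List.enumerate_nil, List.foldl_nil, List.append_nil]
    by_cases hc : cur = []
    · subst hc
      simpa [specGo, findInsert] using findInsert_skip kw nl pre bs hbs []
    · rw [if_pos hc, findInsert_skip kw nl _ bs hbs [(si.getD 0, cur)]]
      simp only [findInsert, hsi hc, Option.getD_some, specGo]
      by_cases hm : cur.any (fun l => PySem.Chars.isIn kw l) = true
      · rw [if_pos hm, if_pos hm]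
        have hcast : (pre.length : Int) + (cur.length : Int)
            = (((pre ++ cur).length : Nat) : Int) := by simp
        rw [hcast, PySem.List.insert_length]
      · rw [if_neg hm, if_neg hm]
        simp
  | cons l rest ih =>
    intro pre cur bs si hsi hbs
    rw [PySem.List.enumerate_cons]
    simp only [List.foldl_cons]
    by_cases h : nonblankLn l = true
    · -- non-blank: the line joins the current block
      have hstep : stepA (bs, cur, si) ((pre.length : Int) + (cur.length : Int), l)
          = (bs, cur ++ [l],
             if cur = [] then some ((pre.length : Int) + (cur.length : Int)) else si) := by
        simp [stepA, h]
      rw [hstep]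
      have key := ih pre (cur ++ [l]) bs
        (if cur = [] then some ((pre.length : Int) + (cur.length : Int)) else si)
        (by intro _
            by_cases hc : cur = []
            · simp [hc]
            · simp [hc, hsi hc]) hbs
      have harith : (pre.length : Int) + ((cur ++ [l]).length : Int)
          = (pre.length : Int) + (cur.length : Int) + 1 := by simp; ring
      rw [harith] at key
      simpa [specGo, List.append_assoc, List.any_append, h, Bool.or_comm] using key
    · by_cases hc : cur = []
      · -- blank line, no open block: state unchanged
        have hstep : stepA (bs, cur, si) ((pre.length : Int) + (cur.length : Int), l)
            = (bs, cur, si) := by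
          simp [stepA, h, hc]
        rw [hstep]
        subst hc
        have key := ih (pre ++ [l]) [] bs si (by simp) hbs
        have harith : (((pre ++ [l]).length : Nat) : Int)
            + ((List.length ([] : List (List Char)) : Nat) : Int)
            = (pre.length : Int) + ((List.length ([] : List (List Char)) : Nat) : Int) + 1 := by
          simp
        rw [harith] at key
        simpa [specGo, List.append_assoc, h] using key
      · -- blank line closes the block
        have hstep : stepA (bs, cur, si) ((pre.length : Int) + (cur.length : Int), l)
            = (bs ++ [(si.getD 0, cur)], [], none) := by
          simp [stepA, h, hc]
        rw [hstep]
        by_cases hm : cur.any (fun l => PySem.Chars.isIn kw l) = true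
        · -- the closed block matches: insertion happens right here, later blocks are skipped
          have hins : ∀ b2, findInsert kw nl (pre ++ cur ++ l :: rest)
              (bs ++ (si.getD 0, cur) :: b2) = pre ++ cur ++ nl :: l :: rest := by
            intro b2
            rw [findInsert_skip kw nl _ bs hbs ((si.getD 0, cur) :: b2),
              findInsert, if_pos hm, hsi hc, Option.getD_some]
            rw [List.append_assoc pre cur (l :: rest)]
            have hcast : (pre.length : Int) + (cur.length : Int)
                = (((pre ++ cur).length : Nat) : Int) := by simp
            rw [hcast, PySem.List.insert_natCast _ _ _ (by simp)]
            simp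
            rw [← List.append_assoc pre cur (l :: rest), List.take_left' (by simp)]
            simp
          rw [stepA_blocks_mono]
          simp only [specGo, h, hm]
          by_cases ht : ((PySem.List.enumerate rest
              ((pre.length : Int) + (cur.length : Int) + 1)).foldl stepA ([], [], none)).2.1 = []
          · rw [if_neg (by simpa using ht)]
            simpa [List.append_assoc] using hins _
          · rw [if_pos (by simpa using ht)]
            simpa [List.append_assoc] using hins _
        · -- the closed block does not match: keep scanning, block recorded as non-matching
          have key := ih (pre ++ cur ++ [l]) [] (bs ++ [(si.getD 0, cur)]) none (by simp)
            (by intro b hb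
                rcases List.mem_append.mp hb with h1 | h1
                · exact hbs b h1
                · simp at h1; simp [h1, hm])
          have harith : (((pre ++ cur ++ [l]).length : Nat) : Int)
              + ((List.length ([] : List (List Char)) : Nat) : Int)
              = (pre.length : Int) + (cur.length : Int) + 1 := by
            simp; omega
          rw [harith] at key
          have hspec : specGo kw nl (cur.any (fun l => PySem.Chars.isIn kw l)) (l :: rest)
              = l :: specGo kw nl false rest := by
            simp [specGo, h, hm]
          rw [hspec]
          simpa [List.append_assoc] using key

-- ===== VERDICT (by name: the statement is the Claim_ definition above) =====
theorem append_to_block_with_keyword_spec : Claim_equal_append_to_block_with_keyword := by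
  intro content keyword line_to_append _
  unfold Spec_append_to_block_with_keyword
  unfold append_to_block_with_keyword append_to_block_with_keyword_alt
  set kw := keyword.toList
  set nl := PySem.Chars.rstrip line_to_append.toList ++ ['\n']
  set ll := splitKeep [] content.toList
  have hA := stepA_run kw nl ll [] [] [] none (by simp) (by simp)
  have hB := stepB_run kw nl ll [] false false (by simp)
  simp only [List.nil_append, List.length_nil, Nat.cast_zero, add_zero, List.any_nil] at hA hB
  simp only [hA, hB]
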